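-- pv_equiv track=rewrite | github.com/twrighta/automated-essay-streamlit | streamlit_app_prod_v3.py | count_obsolete_words
-- ===== SOURCE A (Python) =====
-- def count_obsolete_words(text):
--     obsolete_words = ['basically', 'actually', 'absolutely', 'certainly', 'totally', 'really', 'very', 'that', 'just', 'think',
--                       'got', 'so', 'thing', 'things', 'something', 'stuff', 'like', 'always', 'never', 'big',
--                       'important', 'maybe', 'generally', 'whatever', 'interesting', 'amazing', 'often',
--                       'seriously' 'someone', 'huge', 'best', 'worst', 'nice',
--                       'true', 'seems', 'believe', 'find', 'found', 'seemed', 'get', 'usually', 'many', 'bad',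
--                       'mostly']
--     words = text.split(' ')
--     obsolete_matches = [word.strip() for word in words if word in obsolete_words]
--     obsolete_count = len(obsolete_matches)
--     return obsolete_count
-- ===== SOURCE B (Python) =====
-- OBSOLETE = ['basically', 'actually', 'absolutely', 'certainly', 'totally', 'really', 'very', 'that', 'just', 'think',
--             'got', 'so', 'thing', 'things', 'something', 'stuff', 'like', 'always', 'never', 'big',
--             'important', 'maybe', 'generally', 'whatever', 'interesting', 'amazing', 'often',
--             'seriously' 'someone', 'huge', 'best', 'worst', 'nice',
--             'true', 'seems', 'believe', 'find', 'found', 'seemed', 'get', 'usually', 'many', 'bad',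
--             'mostly']
--
-- def count_obsolete_words(text):
--     # Frequency table once, then look up each distinct obsolete word.
--     counts = {}
--     for w in text.split(' '):
--         counts[w] = counts.get(w, 0) + 1
--     return sum(counts.get(w, 0) for w in dict.fromkeys(OBSOLETE))
-- ===== Notes on version B (the rewrite author's own statement) =====
-- stated objective: alternative
-- what changed: B builds a token-frequency dictionary in one pass and then sums the counts of the distinct obsolete words, instead of filtering every token against the obsolete list.
import Mathlib
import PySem

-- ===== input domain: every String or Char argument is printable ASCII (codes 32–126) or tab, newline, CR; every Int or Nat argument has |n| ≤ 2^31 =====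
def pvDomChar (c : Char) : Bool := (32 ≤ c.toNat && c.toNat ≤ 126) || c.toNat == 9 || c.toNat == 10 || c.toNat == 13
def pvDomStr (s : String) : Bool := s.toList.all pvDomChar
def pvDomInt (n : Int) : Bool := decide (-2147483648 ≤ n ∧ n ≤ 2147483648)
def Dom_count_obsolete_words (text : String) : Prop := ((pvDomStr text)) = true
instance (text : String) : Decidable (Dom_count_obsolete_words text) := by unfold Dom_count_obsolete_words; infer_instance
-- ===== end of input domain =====

-- B: one-pass token-frequency dictionary, then sum the counts of the distinct obsolete words (alternative decomposition, same result).

-- ===== PORT A =====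
-- the fixed list from A (note: 'seriously' 'someone' is Python string concatenation — one item "seriouslysomeone")
def pvObsoleteWords : List String :=
  ["basically", "actually", "absolutely", "certainly", "totally", "really", "very", "that", "just", "think",
   "got", "so", "thing", "things", "something", "stuff", "like", "always", "never", "big",
   "important", "maybe", "generally", "whatever", "interesting", "amazing", "often",
   "seriouslysomeone", "huge", "best", "worst", "nice",
   "true", "seems", "believe", "find", "found", "seemed", "get", "usually", "many", "bad",
   "mostly"]

def count_obsolete_words (text : String) : Int :=
  let words : List String := ((PySem.Str.split? text " ").getD [])
  let obsolete_matches : List String := (words.filter (fun w => pvObsoleteWords.contains w)).map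
    (fun w => PySem.Str.strip w)
  let obsolete_count := obsolete_matches.length
  (obsolete_count : Int)

-- ===== PORT B =====
def count_obsolete_words_alt (text : String) : Int :=
  let counts := (((PySem.Str.split? text " ").getD [])).foldl
    (fun d w => d.insert w (d.getD w 0 + 1)) (PySem.Dict.empty : PySem.Dict String Int)
  (((PySem.List.dedup pvObsoleteWords).map (fun w => counts.getD w 0)).sum)

-- ===== PRECONDITION & SPEC =====
def Spec_count_obsolete_words (text : String) (out : Int) : Prop := out = count_obsolete_words_alt text
instance (text : String) (out : Int) : Decidable (Spec_count_obsolete_words text out) := by unfold Spec_count_obsolete_words; infer_instance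

-- ===== CLAIM (what is proved, stated in full; the proofs are below) =====
def Claim_equal_count_obsolete_words : Prop := ∀ (text : String), Dom_count_obsolete_words text → Spec_count_obsolete_words text (count_obsolete_words text)

-- ===== LEMMAS AND PROOFS =====

-- indicator sum over a duplicate-free list
theorem pv_sum_indicator (x : String) (S : List String) (hS : S.Nodup) :
    (S.map (fun w => (if x == w then (1 : Int) else 0))).sum
      = (if S.contains x then (1 : Int) else 0) := by
  induction S with
  | nil => simp
  | cons a T ih =>
    rcases List.nodup_cons.mp hS with ⟨ha, hT⟩
    by_cases h : x = a
    · subst h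
      have hz : ∀ w ∈ T, (if x == w then (1 : Int) else 0) = 0 := by
        intro w hw
        have : x ≠ w := fun he => ha (he ▸ hw)
        simp [this]
      have hzero : (T.map (fun w => (if x == w then (1 : Int) else 0))).sum = 0 := by
        rw [List.map_congr_left hz]; simp
      rw [List.map_cons, List.sum_cons, hzero]
      simp
    · rw [List.map_cons, List.sum_cons, ih hT]
      simp [h]

-- summing the multiplicities of the distinct members S over l equals counting l's elements lying in S
theorem pv_sum_count_eq_countP (S : List String) (hS : S.Nodup) (l : List String) :
    (S.map (fun w => (l.count w : Int))).sum = (l.countP (fun x => S.contains x) : Int) := by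
  induction l with
  | nil => simp
  | cons x t ih =>
    calc (S.map (fun w => ((x :: t).count w : Int))).sum
        = (S.map (fun w => (t.count w : Int) + (if x == w then (1 : Int) else 0))).sum := by
          congr 1; apply List.map_congr_left; intro w _
          rw [List.count_cons]
          by_cases h : x = w <;> simp [h]
      _ = (S.map (fun w => (t.count w : Int))).sum
            + (S.map (fun w => (if x == w then (1 : Int) else 0))).sum := by
          rw [← List.sum_map_add]
      _ = (t.countP (fun x => S.contains x) : Int) + (if S.contains x then (1 : Int) else 0) := by
          rw [ih, pv_sum_indicator x S hS]
      _ = ((x :: t).countP (fun x => S.contains x) : Int) := by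
          rw [List.countP_cons]
          split_ifs <;> simp

-- ===== VERDICT (by name: the statement is the Claim_ definition above) =====
set_option maxRecDepth 8192 in
theorem count_obsolete_words_spec : Claim_equal_count_obsolete_words := by
  intro text _
  unfold Spec_count_obsolete_words count_obsolete_words count_obsolete_words_alt
  have hd : PySem.List.dedup pvObsoleteWords = pvObsoleteWords := by decide
  have hnd : pvObsoleteWords.Nodup := by decide
  simp only [List.length_map, PySem.Dict.getD_foldl_insert_add_one, hd]
  have hz : ∀ (w : String), (PySem.Dict.empty : PySem.Dict String Int).getD w 0 = 0 := by
    intro w; simp [PySem.Dict.empty, PySem.Dict.getD, PySem.Dict.get?]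
  simp only [hz, zero_add]
  rw [pv_sum_count_eq_countP pvObsoleteWords hnd]
  simp [List.countP_eq_length_filter]
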